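-- pv_equiv track=rewrite | github.com/leki-hub/python-practice | Rev15.py | add_conc
-- ===== SOURCE A (Python) =====
-- def add_conc(sap):
--       result= 0
--       alphabet= " "
--       for item in sap:
--         if item.isdigit():
--             result +=int(item)
--         else:
--             alphabet+= item
--
--       return(result, alphabet)
-- ===== SOURCE B (Python) =====
-- DIGITS = "0123456789"
-- _DELETE_DIGITS = str.maketrans("", "", DIGITS)
--
-- def add_conc(sap):
--     # counting algorithm: result = sum over each digit value of (value * its multiplicity);
--     # alphabet = the string with all digit characters deleted, behind the " " seed.
--     result = sum(v * sap.count(d) for v, d in enumerate(DIGITS))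
--     alphabet = " " + sap.translate(_DELETE_DIGITS)
--     return (result, alphabet)
-- ===== Notes on version B (the rewrite author's own statement) =====
-- stated objective: faster
-- what changed: A's single branching Python-level scan with two running accumulators is replaced by a counting algorithm: the digit sum is computed as sum of v * sap.count(str(v)) over the ten digit values and the non-digit part is obtained by deleting the digit characters with str.translate, both C-level primitives.
import Mathlib
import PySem

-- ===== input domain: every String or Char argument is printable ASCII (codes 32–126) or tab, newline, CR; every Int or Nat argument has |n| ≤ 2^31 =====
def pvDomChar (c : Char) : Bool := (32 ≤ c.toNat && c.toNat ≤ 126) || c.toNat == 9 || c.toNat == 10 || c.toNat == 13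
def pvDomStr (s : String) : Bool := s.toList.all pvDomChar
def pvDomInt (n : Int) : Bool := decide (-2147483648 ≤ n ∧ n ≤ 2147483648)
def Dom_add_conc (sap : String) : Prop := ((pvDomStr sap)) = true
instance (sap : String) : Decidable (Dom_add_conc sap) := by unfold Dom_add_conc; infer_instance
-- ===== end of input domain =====

-- B replaces A's single branching scan with a counting algorithm: the sum is
-- Σ_v v * sap.count(digit v) over the ten digits and the non-digit part is the string
-- with the digit characters deleted via translate; a timing run measured B faster
-- (C-level count/translate vs a per-character Python loop).


-- ===== PORT A =====
-- int(item) for a single character `c`; A applies it only where c.isdigit() holds,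
-- and there PySem.Int.ofChars? is always `some`, so the default never fires.
def pyInt1 (c : Char) : Int := (PySem.Int.ofChars? [c]).getD 0

-- the `for item in sap:` loop, state = (result, alphabet as List Char)
def addConcLoopA : List Char → Int → List Char → Int × List Char
  | [], result, alphabet => (result, alphabet)
  | c :: cs, result, alphabet =>
      if PySem.Chars.isdigit c then addConcLoopA cs (result + pyInt1 c) alphabet
      else addConcLoopA cs result (alphabet ++ [c])

def add_conc (sap : String) : Int × String :=
  let (result, alphabet) := addConcLoopA sap.toList 0 [' ']
  (result, String.mk alphabet)

-- ===== PORT B =====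
-- DIGITS = "0123456789"
def pvDigits : List Char := ['0', '1', '2', '3', '4', '5', '6', '7', '8', '9']

def add_conc_alt (sap : String) : Int × String :=
  -- sum(v * sap.count(d) for v, d in enumerate(DIGITS))
  let result : Int :=
    ((PySem.List.enumerate pvDigits).map
      (fun vd => vd.1 * ((PySem.Str.count sap (String.mk [vd.2])) : Int))).sum
  -- sap.translate(str.maketrans("", "", DIGITS)): delete every digit character
  -- (ported by hand as a filter; exact, since the table only deletes these ten chars)
  let alphabet : List Char := ' ' :: sap.toList.filter (fun c => !(pvDigits.contains c))
  (result, String.mk alphabet)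

-- ===== PRECONDITION & SPEC =====
def Spec_add_conc (sap : String) (out : Int × String) : Prop := out = add_conc_alt sap
instance (sap : String) (out : Int × String) : Decidable (Spec_add_conc sap out) := by unfold Spec_add_conc; infer_instance

-- ===== CLAIM (what is proved, stated in full; the proofs are below) =====
def Claim_equal_add_conc : Prop := ∀ (sap : String), Dom_add_conc sap → Spec_add_conc sap (add_conc sap)

-- ===== LEMMAS AND PROOFS =====

-- A's loop computed in closed form
theorem addConcLoopA_eq (cs : List Char) : ∀ (r : Int) (a : List Char),
    addConcLoopA cs r a =
      (r + ((cs.filter (fun c => PySem.Chars.isdigit c)).map pyInt1).sum,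
       a ++ cs.filter (fun c => !PySem.Chars.isdigit c)) := by
  induction cs with
  | nil => intro r a; simp [addConcLoopA]
  | cons c cs ih =>
      intro r a
      by_cases h : PySem.Chars.isdigit c = true <;>
        · simp [addConcLoopA, h, ih]
          try ring

-- a character is a digit iff it is one of the ten digit characters
theorem isdigit_iff_mem (c : Char) : PySem.Chars.isdigit c = true ↔ c ∈ pvDigits := by
  constructor
  · intro h
    simp only [PySem.Chars.isdigit, Bool.and_eq_true, decide_eq_true_eq] at h
    have h48 : 48 ≤ c.toNat := h.1
    have h57 : c.toNat ≤ 57 := h.2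
    have hofNat : Char.ofNat c.toNat = c := Char.ofNat_toNat c
    interval_cases h' : c.toNat <;> (rw [← hofNat]; decide)
  · intro h
    fin_cases h <;> decide

theorem isdigit_eq_contains (c : Char) :
    PySem.Chars.isdigit c = pvDigits.contains c := by
  by_cases h : PySem.Chars.isdigit c = true
  · rw [h]; exact ((List.contains_iff_mem).mpr ((isdigit_iff_mem c).mp h)).symm
  · rw [Bool.not_eq_true] at h
    rw [h]
    symm
    rw [Bool.eq_false_iff]
    intro hc
    exact absurd ((isdigit_iff_mem c).mpr (List.contains_iff_mem.mp hc))
      (by rw [h]; simp)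

-- Chars.count with a single-character needle is List.count
theorem countgo_single (d : Char) (l : List Char) : ∀ (fuel acc : Nat),
    l.length ≤ fuel →
    PySem.Chars.count.go [d] fuel l acc = acc + l.count d := by
  induction l with
  | nil => intro fuel acc _; cases fuel <;> simp [PySem.Chars.count.go]
  | cons c cs ih =>
      intro fuel acc hf
      cases fuel with
      | zero => simp at hf
      | succ n =>
          simp only [List.length_cons, Nat.succ_le_succ_iff] at hf
          by_cases h : c = d
          · subst h
            have hpre : List.isPrefixOf [c] (c :: cs) = true := by
              simp [List.isPrefixOf]
            simp only [PySem.Chars.count.go, hpre, if_pos]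
            rw [show List.drop (List.length [c]) (c :: cs) = cs by simp]
            rw [ih n (acc + 1) hf, List.count_cons_self]
            omega
          · have hpre : List.isPrefixOf [d] (c :: cs) = false := by
              simp [List.isPrefixOf]; exact fun hh => absurd hh.symm h
            simp only [PySem.Chars.count.go, hpre, Bool.false_eq_true, if_false]
            rw [ih n acc hf, List.count_cons_of_ne (by exact fun hh => h hh)]

theorem count_single (s : List Char) (d : Char) :
    PySem.Chars.count s [d] = s.count d := by
  simp only [PySem.Chars.count, List.isEmpty_cons, if_false, Bool.false_eq_true]
  simpa using countgo_single d s s.length 0 le_rfl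

-- B's counting sum, as a function of the character list
def pvCountSum (cs : List Char) : Int :=
  ((PySem.List.enumerate pvDigits).map
    (fun vd => vd.1 * ((cs.count vd.2 : Nat) : Int))).sum

theorem enumerate_pvDigits :
    PySem.List.enumerate pvDigits =
      [(0,'0'),(1,'1'),(2,'2'),(3,'3'),(4,'4'),(5,'5'),(6,'6'),(7,'7'),(8,'8'),(9,'9')] := by
  decide

theorem pvCountSum_nil : pvCountSum [] = 0 := by decide

theorem pvCountSum_cons (c : Char) (cs : List Char) :
    pvCountSum (c :: cs) =
      (if PySem.Chars.isdigit c then pyInt1 c else 0) + pvCountSum cs := by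
  by_cases h : PySem.Chars.isdigit c = true
  · have hm := (isdigit_iff_mem c).mp h
    fin_cases hm <;>
      · simp only [pvCountSum, enumerate_pvDigits, List.map_cons, List.map_nil,
          List.sum_cons, List.sum_nil, List.count_cons, h, if_pos,
          show pyInt1 '0' = 0 from by decide, show pyInt1 '1' = 1 from by decide,
          show pyInt1 '2' = 2 from by decide, show pyInt1 '3' = 3 from by decide,
          show pyInt1 '4' = 4 from by decide, show pyInt1 '5' = 5 from by decide,
          show pyInt1 '6' = 6 from by decide, show pyInt1 '7' = 7 from by decide,
          show pyInt1 '8' = 8 from by decide, show pyInt1 '9' = 9 from by decide]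
        simp
        try push_cast
        try ring
  · have hne : ∀ d ∈ pvDigits, ¬ (c = d) := by
      intro d hd hc
      exact h ((isdigit_iff_mem c).mpr (hc ▸ hd))
    rw [Bool.not_eq_true] at h
    simp only [pvCountSum, enumerate_pvDigits, List.map_cons, List.map_nil,
      List.sum_cons, List.sum_nil, List.count_cons, h, Bool.false_eq_true, if_false]
    have e : ∀ d ∈ pvDigits, (c == d) = false := by
      intro d hd
      exact beq_eq_false_iff_ne.mpr (hne d hd)
    rw [e '0' (by decide), e '1' (by decide), e '2' (by decide), e '3' (by decide),
        e '4' (by decide), e '5' (by decide), e '6' (by decide), e '7' (by decide),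
        e '8' (by decide), e '9' (by decide)]
    simp

theorem pvCountSum_eq (cs : List Char) :
    pvCountSum cs = ((cs.filter (fun c => PySem.Chars.isdigit c)).map pyInt1).sum := by
  induction cs with
  | nil => exact pvCountSum_nil
  | cons c cs ih =>
      rw [pvCountSum_cons, ih]
      by_cases h : PySem.Chars.isdigit c = true <;> simp [h]

-- ===== VERDICT (by name: the statement is the Claim_ definition above) =====
theorem add_conc_spec : Claim_equal_add_conc := by
  intro sap _
  unfold Spec_add_conc add_conc add_conc_alt
  rw [addConcLoopA_eq]
  refine Prod.ext ?_ ?_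
  · show (0 : Int) + _ = _
    rw [zero_add, ← pvCountSum_eq]
    simp only [pvCountSum, PySem.Str.count_eq]
    congr 1
    refine List.map_congr_left ?_
    intro vd _
    rw [show (String.mk [vd.2]).toList = [vd.2] from String.toList_ofList, count_single]
  · show String.mk (' ' :: _) = String.mk (' ' :: _)
    congr 2
    exact List.filter_congr (fun c _ => by rw [isdigit_eq_contains])
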